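-- pv_equiv track=rewrite | github.com/ziyingc/fly_pair_tracking | numphly/numphly.py | binary_segments
-- ===== SOURCE A (Python) =====
-- def binary_segments(binary_array, time_per_step):
--     segments = []
--     n = len(binary_array)
--     current_state = binary_array[0]
--     start_time = 0
--
--     for i in range(1, n):
--         if binary_array[i] != current_state:
--             end_time = i * time_per_step
--             segments.append((current_state, start_time, end_time))
--             current_state = binary_array[i]
--             start_time = end_time
--     # Add the last segment
--     segments.append((current_state, start_time, n * time_per_step))
--     return segments
-- ===== SOURCE B (Python) =====
-- def binary_segments(binary_array, time_per_step):
--     n = len(binary_array)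
--     bounds = [0] + [i for i in range(1, n) if binary_array[i] != binary_array[i - 1]] + [n]
--     return [(binary_array[a], a * time_per_step, b * time_per_step)
--             for a, b in zip(bounds, bounds[1:])]
-- ===== Notes on version B (the rewrite author's own statement) =====
-- stated objective: alternative
-- what changed: B first collects all change points into a boundary list and then maps each consecutive boundary pair to a segment, reading the state value from the array at the segment's start index, instead of A's single stateful pass that tracks current_state/start_time in mutable variables.
import Mathlib
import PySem

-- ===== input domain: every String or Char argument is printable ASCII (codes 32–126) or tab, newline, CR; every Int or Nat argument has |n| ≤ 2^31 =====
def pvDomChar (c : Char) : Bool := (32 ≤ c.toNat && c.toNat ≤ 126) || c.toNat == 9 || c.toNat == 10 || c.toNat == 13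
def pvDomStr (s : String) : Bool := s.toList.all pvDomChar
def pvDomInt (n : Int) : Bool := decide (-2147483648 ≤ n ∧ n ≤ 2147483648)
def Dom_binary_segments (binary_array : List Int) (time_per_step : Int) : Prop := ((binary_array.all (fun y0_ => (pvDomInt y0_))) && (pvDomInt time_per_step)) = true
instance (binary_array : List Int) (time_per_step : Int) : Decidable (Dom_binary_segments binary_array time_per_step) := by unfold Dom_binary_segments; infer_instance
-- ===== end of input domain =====

-- B replaces A's stateful single pass (mutable current_state/start_time) by a boundary list of change
-- points mapped pairwise to segments; same values, same cost (objective: alternative).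

-- ===== PORT A =====
-- A's stateful loop: state = (segments, current_state, start_time).
def binary_segments (binary_array : List Int) (time_per_step : Int) : List (Int × Int × Int) :=
  match PySem.List.pyGet? binary_array 0 with
  | none => []   -- Python raises IndexError here; excluded by Pre_binary_segments
  | some c0 =>
    let st := (PySem.List.pyRange 1 (binary_array.length : Int) 1).foldl
      (fun (acc : List (Int × Int × Int) × Int × Int) i =>
        if PySem.List.pyGetD binary_array i 0 ≠ acc.2.1 then
          (acc.1 ++ [(acc.2.1, acc.2.2, i * time_per_step)],
           PySem.List.pyGetD binary_array i 0, i * time_per_step)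
        else acc) ([], c0, 0)
    st.1 ++ [(st.2.1, st.2.2, (binary_array.length : Int) * time_per_step)]

-- ===== PORT B =====
-- B: bounds = [0] + change points + [n]; map each consecutive boundary pair to a segment.
def binary_segments_alt (binary_array : List Int) (time_per_step : Int) : List (Int × Int × Int) :=
  let bounds : List Int :=
    0 :: ((PySem.List.pyRange 1 (binary_array.length : Int) 1).filter
      (fun i => PySem.List.pyGetD binary_array i 0 ≠ PySem.List.pyGetD binary_array (i - 1) 0))
      ++ [(binary_array.length : Int)]
  (bounds.zip bounds.tail).map (fun ab =>
    (PySem.List.pyGetD binary_array ab.1 0, ab.1 * time_per_step, ab.2 * time_per_step))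

-- ===== PRECONDITION & SPEC =====
-- A (and B) raise IndexError on the empty list; nothing else raises.
def Pre_binary_segments (binary_array : List Int) (time_per_step : Int) : Prop := binary_array ≠ []
instance (binary_array : List Int) (time_per_step : Int) : Decidable (Pre_binary_segments binary_array time_per_step) := by unfold Pre_binary_segments; infer_instance
def pvWitness_binary_segments : List Int × Int := ([1, 1, 0, 0, 1], 2)

def Spec_binary_segments (binary_array : List Int) (time_per_step : Int) (out : List (Int × Int × Int)) : Prop := out = binary_segments_alt binary_array time_per_step
instance (binary_array : List Int) (time_per_step : Int) (out : List (Int × Int × Int)) : Decidable (Spec_binary_segments binary_array time_per_step out) := by unfold Spec_binary_segments; infer_instance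

-- ===== CLAIM (what is proved, stated in full; the proofs are below) =====
def Claim_equal_binary_segments : Prop := ∀ (binary_array : List Int) (time_per_step : Int), Dom_binary_segments binary_array time_per_step → Pre_binary_segments binary_array time_per_step → Spec_binary_segments binary_array time_per_step (binary_segments binary_array time_per_step)

-- ===== LEMMAS AND PROOFS =====

-- Main invariant: processing indices j..n-1, A's state is (segs, cur, prev*t) with
-- cur = ba[prev] = ba[j-1]; the result equals segs ++ B's pairwise-mapped segments
-- built from the remaining change points with previous boundary prev.
theorem binary_segments_invariant (ba : List Int) (t : Int) (k : Nat) :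
    ∀ (j prev cur : Int) (segs : List (Int × Int × Int)),
      j + k = ba.length → 1 ≤ j → 0 ≤ prev → prev < j →
      PySem.List.pyGetD ba prev 0 = cur → PySem.List.pyGetD ba (j - 1) 0 = cur →
      (let st := (PySem.List.pyRange j (ba.length : Int) 1).foldl
        (fun (acc : List (Int × Int × Int) × Int × Int) i =>
          if PySem.List.pyGetD ba i 0 ≠ acc.2.1 then
            (acc.1 ++ [(acc.2.1, acc.2.2, i * t)], PySem.List.pyGetD ba i 0, i * t)
          else acc) (segs, cur, prev * t)
       st.1 ++ [(st.2.1, st.2.2, (ba.length : Int) * t)])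
      = segs ++
        (let tb := ((PySem.List.pyRange j (ba.length : Int) 1).filter
            (fun i => PySem.List.pyGetD ba i 0 ≠ PySem.List.pyGetD ba (i - 1) 0)) ++ [(ba.length : Int)]
         ((prev :: tb).zip tb).map (fun ab =>
           (PySem.List.pyGetD ba ab.1 0, ab.1 * t, ab.2 * t))) := by
  induction k with
  | zero =>
    intro j prev cur segs hjk hj hp hpj hprev hjm
    have hjn : (ba.length : Int) ≤ j := by omega
    simp [PySem.List.pyRange_one_eq_nil hjn, hprev]
  | succ k ih =>
    intro j prev cur segs hjk hj hp hpj hprev hjm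
    have hjn : j < (ba.length : Int) := by omega
    rw [PySem.List.pyRange_one_cons hjn]
    by_cases hne : PySem.List.pyGetD ba j 0 ≠ cur
    · have hfilt : PySem.List.pyGetD ba j 0 ≠ PySem.List.pyGetD ba (j - 1) 0 := by
        rw [hjm]; exact hne
      simp only [List.foldl_cons, List.filter_cons, hfilt, decide_not]
      rw [if_pos hne]
      have := ih (j + 1) j (PySem.List.pyGetD ba j 0) (segs ++ [(cur, prev * t, j * t)])
        (by omega) (by omega) (by omega) (by omega) rfl (by simp)
      simp only [] at this ⊢
      rw [this]
      simp [hprev]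
    · push_neg at hne
      have hfilt : ¬ (PySem.List.pyGetD ba j 0 ≠ PySem.List.pyGetD ba (j - 1) 0) := by
        rw [hjm, hne]; simp
      simp only [List.foldl_cons, List.filter_cons]
      rw [if_neg (by simpa using hne)]
      rw [show (decide (PySem.List.pyGetD ba j 0 ≠ PySem.List.pyGetD ba (j - 1) 0)) = false by
        simpa using hfilt]
      simp only [Bool.false_eq_true, if_false]
      exact ih (j + 1) prev cur segs (by omega) (by omega) (by omega) (by omega) hprev
        (by simpa using hne)

-- ===== VERDICT (by name: the statement is the Claim_ definition above) =====
theorem binary_segments_spec : Claim_equal_binary_segments := by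
  intro ba t _ hpre
  unfold Spec_binary_segments binary_segments binary_segments_alt
  match hba : ba with
  | [] => exact absurd rfl hpre
  | x :: rest =>
    rw [show PySem.List.pyGet? (x :: rest) 0 = some x by simp [pysem]]
    have := binary_segments_invariant (x :: rest) t rest.length 1 0 x []
      (by simp; omega) (by omega) (by omega) (by omega)
      (by simp [pysem]) (by simp [pysem])
    simp only [] at this
    rw [zero_mul] at this
    simp only [List.nil_append] at this
    exact this
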